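-- pv_equiv track=rewrite | github.com/Evan-Feng/nlp-projects | wordseg/utils.py | eval_sent
-- ===== SOURCE A (Python) =====
-- def eval_sent(gold_sent, pred_sent):
--     def s2w(sent):
--         res, p = set(), 0
--         for w in sent.split():
--             res.add((p, len(w)))
--             p += len(w)
--         return res
--
--     return len(s2w(gold_sent) & s2w(pred_sent)), len(gold_sent.split()), len(pred_sent.split())
-- ===== SOURCE B (Python) =====
-- def eval_sent(gold_sent, pred_sent):
--     def segs(sent):
--         out, p = [], 0
--         for w in sent.split():
--             out.append((p, len(w)))
--             p += len(w)
--         return out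
--
--     g, q = segs(gold_sent), segs(pred_sent)
--     i = j = m = 0
--     while i < len(g) and j < len(q):
--         if g[i] == q[j]:
--             m += 1
--             i += 1
--             j += 1
--         elif g[i] < q[j]:
--             i += 1
--         else:
--             j += 1
--     return m, len(g), len(q)
-- ===== Notes on version B (the rewrite author's own statement) =====
-- stated objective: alternative
-- what changed: Replaces hash-set construction and set intersection by ordered (start,length) segment lists and a two-pointer sorted merge that counts matching segments.
import Mathlib
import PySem

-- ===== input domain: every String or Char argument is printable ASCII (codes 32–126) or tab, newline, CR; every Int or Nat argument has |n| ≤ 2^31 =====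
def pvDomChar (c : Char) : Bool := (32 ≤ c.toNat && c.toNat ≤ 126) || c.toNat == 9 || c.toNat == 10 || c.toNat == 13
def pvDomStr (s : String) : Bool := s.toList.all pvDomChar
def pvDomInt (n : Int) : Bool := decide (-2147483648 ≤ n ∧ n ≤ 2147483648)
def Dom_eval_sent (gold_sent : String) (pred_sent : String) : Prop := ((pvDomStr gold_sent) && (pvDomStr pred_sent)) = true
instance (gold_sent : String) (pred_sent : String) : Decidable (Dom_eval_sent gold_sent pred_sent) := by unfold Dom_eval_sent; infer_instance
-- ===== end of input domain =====

-- B replaces A's hash-set intersection by ordered segment lists and a two-pointer merge (alternative decomposition, same cost).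

-- ===== PORT A =====
-- inner helper s2w: builds the set of (start, length) pairs of sent.split()
def pvS2w (sent : String) : PySem.Set (Int × Int) :=
  ((PySem.Str.split₀ sent).foldl
    (fun (st : PySem.Set (Int × Int) × Int) w =>
      (PySem.Set.add st.1 (st.2, PySem.Str.len w), st.2 + PySem.Str.len w))
    (PySem.Set.empty, 0)).1

def eval_sent (gold_sent : String) (pred_sent : String) : Int × Int × Int :=
  (PySem.Set.len (PySem.Set.inter (pvS2w gold_sent) (pvS2w pred_sent)),
   ((PySem.Str.split₀ gold_sent).length : Int),
   ((PySem.Str.split₀ pred_sent).length : Int))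

-- ===== PORT B =====
-- segs: ordered list of (start, length) pairs
def pvSegs (sent : String) : List (Int × Int) :=
  ((PySem.Str.split₀ sent).foldl
    (fun (st : List (Int × Int) × Int) w =>
      (st.1 ++ [(st.2, PySem.Str.len w)], st.2 + PySem.Str.len w))
    ([], 0)).1

-- Python's lexicographic tuple comparison g[i] < q[j]
def pvLexLt (a b : Int × Int) : Bool := a.1 < b.1 || (a.1 == b.1 && a.2 < b.2)

-- the two-pointer while loop, as recursion on the two suffixes
def pvMerge : List (Int × Int) → List (Int × Int) → Int
  | [], _ => 0
  | _ :: _, [] => 0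
  | a :: g, b :: q =>
    if a = b then 1 + pvMerge g q
    else if pvLexLt a b then pvMerge g (b :: q)
    else pvMerge (a :: g) q
termination_by g q => g.length + q.length

def eval_sent_alt (gold_sent : String) (pred_sent : String) : Int × Int × Int :=
  let g := pvSegs gold_sent
  let q := pvSegs pred_sent
  (pvMerge g q, (g.length : Int), (q.length : Int))

-- ===== PRECONDITION & SPEC =====
def Spec_eval_sent (gold_sent : String) (pred_sent : String) (out : Int × Int × Int) : Prop := out = eval_sent_alt gold_sent pred_sent
instance (gold_sent : String) (pred_sent : String) (out : Int × Int × Int) : Decidable (Spec_eval_sent gold_sent pred_sent out) := by unfold Spec_eval_sent; infer_instance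

-- ===== CLAIM (what is proved, stated in full; the proofs are below) =====
def Claim_equal_eval_sent : Prop := ∀ (gold_sent : String) (pred_sent : String), Dom_eval_sent gold_sent pred_sent → Spec_eval_sent gold_sent pred_sent (eval_sent gold_sent pred_sent)

-- ===== LEMMAS AND PROOFS =====

-- every word produced by split() is nonempty
theorem split₀_go_ne_nil (rest : List Char) (cur : List Char) (acc : List (List Char))
    (hacc : ∀ w ∈ acc, w ≠ []) :
    ∀ w ∈ PySem.Chars.split₀.go rest cur acc, w ≠ [] := by
  induction rest generalizing cur acc with
  | nil =>
    intro w hw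
    simp only [PySem.Chars.split₀.go] at hw
    split at hw
    · exact hacc w (List.mem_reverse.mp hw)
    · next hne =>
      rcases List.mem_cons.mp (List.mem_reverse.mp hw) with h | h
      · subst h
        simpa [List.isEmpty_iff] using hne
      · exact hacc w h
  | cons c rest ih =>
    intro w hw
    simp only [PySem.Chars.split₀.go] at hw
    split at hw
    · split at hw
      · exact ih [] acc hacc w hw
      · next hne =>
        refine ih [] (cur.reverse :: acc) ?_ w hw
        intro v hv
        rcases List.mem_cons.mp hv with h | h
        · subst h; simpa [List.isEmpty_iff] using hne
        · exact hacc v h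
    · exact ih (c :: cur) acc hacc w hw

theorem len_pos_of_mem_split₀ (s : String) :
    ∀ w ∈ PySem.Str.split₀ s, 0 < PySem.Str.len w := by
  intro w hw
  simp only [PySem.Str.split₀, List.mem_map] at hw
  obtain ⟨cs, hcs, rfl⟩ := hw
  have hne : cs ≠ [] := split₀_go_ne_nil s.toList [] [] (by simp) cs hcs
  have : 0 < cs.length := List.length_pos_iff.mpr hne
  simp only [PySem.Str.len]
  simpa [String.toList_ofList] using this

-- the two folds agree and produce a strictly start-sorted list
theorem fold_inv (ws : List String) (s : List (Int × Int)) (p : Int)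
    (hw : ∀ w ∈ ws, 0 < PySem.Str.len w)
    (hs : ∀ x ∈ s, x.1 < p) (hp : s.Pairwise (fun a b => a.1 < b.1)) :
    (ws.foldl (fun (st : PySem.Set (Int × Int) × Int) w =>
        (PySem.Set.add st.1 (st.2, PySem.Str.len w), st.2 + PySem.Str.len w)) (s, p))
      = (ws.foldl (fun (st : List (Int × Int) × Int) w =>
        (st.1 ++ [(st.2, PySem.Str.len w)], st.2 + PySem.Str.len w)) (s, p)) ∧
    (∀ x ∈ (ws.foldl (fun (st : List (Int × Int) × Int) w =>
        (st.1 ++ [(st.2, PySem.Str.len w)], st.2 + PySem.Str.len w)) (s, p)).1,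
        x.1 < (ws.foldl (fun (st : List (Int × Int) × Int) w =>
        (st.1 ++ [(st.2, PySem.Str.len w)], st.2 + PySem.Str.len w)) (s, p)).2) ∧
    ((ws.foldl (fun (st : List (Int × Int) × Int) w =>
        (st.1 ++ [(st.2, PySem.Str.len w)], st.2 + PySem.Str.len w)) (s, p)).1.Pairwise
        (fun a b => a.1 < b.1)) := by
  induction ws generalizing s p with
  | nil => exact ⟨rfl, hs, hp⟩
  | cons w ws ih =>
    have hwlen : 0 < PySem.Str.len w := hw w (List.mem_cons_self)
    have hnotmem : (p, PySem.Str.len w) ∉ s := by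
      intro hmem
      have := hs _ hmem
      simp at this
    have hadd : PySem.Set.add s (p, PySem.Str.len w) = s ++ [(p, PySem.Str.len w)] := by
      simp only [PySem.Set.add]
      rw [if_neg]
      simp only [PySem.Set.contains_eq_listContains]
      simpa using hnotmem
    have hs' : ∀ x ∈ s ++ [(p, PySem.Str.len w)], x.1 < p + PySem.Str.len w := by
      intro x hx
      rcases List.mem_append.mp hx with h | h
      · have := hs x h; omega
      · simp at h; subst h; simpa using hwlen
    have hp' : (s ++ [(p, PySem.Str.len w)]).Pairwise (fun a b => a.1 < b.1) := by
      refine List.pairwise_append.mpr ⟨hp, by simp, ?_⟩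
      intro a ha b hb
      simp at hb; subst hb
      exact hs a ha
    have := ih (s ++ [(p, PySem.Str.len w)]) (p + PySem.Str.len w)
      (fun v hv => hw v (List.mem_cons_of_mem _ hv)) hs' hp'
    simpa only [List.foldl_cons, hadd] using this

theorem s2w_eq_segs (sent : String) :
    pvS2w sent = pvSegs sent ∧ (pvSegs sent).Pairwise (fun a b => a.1 < b.1) := by
  have h := fold_inv (PySem.Str.split₀ sent) [] 0 (len_pos_of_mem_split₀ sent)
    (by simp) (by simp)
  refine ⟨?_, h.2.2⟩
  simp only [pvS2w, pvSegs, PySem.Set.empty]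
  rw [h.1]

theorem segs_length (sent : String) :
    (pvSegs sent).length = (PySem.Str.split₀ sent).length := by
  have aux : ∀ (ws : List String) (s : List (Int × Int)) (p : Int),
      (ws.foldl (fun (st : List (Int × Int) × Int) w =>
        (st.1 ++ [(st.2, PySem.Str.len w)], st.2 + PySem.Str.len w)) (s, p)).1.length
        = s.length + ws.length := by
    intro ws
    induction ws with
    | nil => simp
    | cons w ws ih =>
      intro s p
      simp only [List.foldl_cons]
      rw [ih]
      simp only [List.length_append, List.length_cons, List.length_nil]
      omega
  simpa using aux (PySem.Str.split₀ sent) [] 0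

-- the merge counts exactly the elements of g that occur in q
theorem merge_eq_filter (g q : List (Int × Int))
    (hg : g.Pairwise (fun a b => a.1 < b.1)) (hq : q.Pairwise (fun a b => a.1 < b.1)) :
    pvMerge g q = ((g.filter (fun x => q.contains x)).length : Int) := by
  induction g, q using pvMerge.induct with
  | case1 q => simp [pvMerge]
  | case2 a g => simp [pvMerge]
  | case3 g b q ih =>
    have hgq : ∀ x ∈ g, (b :: q).contains x = q.contains x := by
      intro x hx
      have hax : b.1 < x.1 := (List.pairwise_cons.mp hg).1 x hx
      have hxb : (x == b) = false := by
        simp only [beq_eq_false_iff_ne]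
        intro h; subst h; omega
      rw [List.contains_cons, hxb, Bool.false_or]
    rw [pvMerge]
    rw [if_pos rfl]
    rw [ih (List.pairwise_cons.mp hg).2 (List.pairwise_cons.mp hq).2]
    have hfil : List.filter (fun x => (b :: q).contains x) (b :: g)
        = b :: List.filter (fun x => q.contains x) g := by
      rw [List.filter_cons_of_pos (by rw [List.contains_cons, BEq.rfl, Bool.true_or])]
      rw [List.filter_congr hgq]
    rw [hfil]
    simp only [List.length_cons]
    push_cast
    omega
  | case4 a g b q hne hlt ih =>
    have hanq : (b :: q).contains a = false := by
      have hbq := (List.pairwise_cons.mp hq).1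
      have hab : a.1 ≤ b.1 := by
        simp only [pvLexLt, Bool.or_eq_true, decide_eq_true_eq, Bool.and_eq_true,
          beq_iff_eq] at hlt
        omega
      simp only [List.contains_cons, Bool.or_eq_false_iff, beq_eq_false_iff_ne]
      refine ⟨hne, ?_⟩
      rw [List.contains_eq_any_beq, List.any_eq_false]
      intro x hx
      have hbx : b.1 < x.1 := hbq x hx
      intro h
      rw [beq_iff_eq] at h
      subst h; omega
    rw [pvMerge]
    rw [if_neg hne, if_pos hlt]
    rw [ih (List.pairwise_cons.mp hg).2 hq]
    rw [List.filter_cons_of_neg (by intro hc; rw [hanq] at hc; cases hc)]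
  | case5 a g b q hne hlt ih =>
    have hbg : ∀ x ∈ a :: g, (b :: q).contains x = q.contains x := by
      intro x hx
      simp only [pvLexLt, Bool.or_eq_true, decide_eq_true_eq, Bool.and_eq_true,
        beq_iff_eq, not_or, not_and, not_lt] at hlt
      have hxb : (x == b) = false := by
        simp only [beq_eq_false_iff_ne]
        rcases List.mem_cons.mp hx with h | h
        · subst h; exact hne
        · have hax : a.1 < x.1 := (List.pairwise_cons.mp hg).1 x h
          intro heq; subst heq
          have : x.1 ≤ a.1 := hlt.1
          omega
      rw [List.contains_cons, hxb, Bool.false_or]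
    rw [pvMerge]
    rw [if_neg hne, if_neg hlt]
    rw [ih hg (List.pairwise_cons.mp hq).2]
    rw [List.filter_congr hbg]

-- ===== VERDICT (by name: the statement is the Claim_ definition above) =====
theorem eval_sent_spec : Claim_equal_eval_sent := by
  intro gold_sent pred_sent _
  unfold Spec_eval_sent
  obtain ⟨hge, hgp⟩ := s2w_eq_segs gold_sent
  obtain ⟨hpe, hpp⟩ := s2w_eq_segs pred_sent
  simp only [eval_sent, eval_sent_alt, hge, hpe]
  rw [merge_eq_filter _ _ hgp hpp]
  simp only [PySem.Set.inter, PySem.Set.len, PySem.Set.contains_eq_listContains]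
  rw [segs_length gold_sent, segs_length pred_sent]
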